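-- pv_equiv track=rewrite | github.com/SilverGuo/koroker | dev/util_data.py | extract_chunk
-- ===== SOURCE A (Python) =====
-- def extract_chunk(label, entity_dict):
--
--     idx_other = entity_dict['O']
--     idx_dict = {idx: entity for entity, idx in entity_dict.items()}
--
--     lchunk = []
--     chunk_type, chunk_start = None, None
--
--     for idx, tok in enumerate(label):
--
--         # end of chunk
--         if tok == idx_other and chunk_type is not None:
--             chunk = (chunk_type, chunk_start, idx)
--             # add to list
--             lchunk.append(chunk)
--             chunk_type, chunk_start = None, None
--
--         # next chunk
--         elif tok != idx_other:
--             tok_class = idx_dict[tok].split('-')[0]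
--             tok_type = idx_dict[tok].split('-')[1]
--             # new chunk
--             if chunk_type is None:
--                 chunk_type, chunk_start = tok_type, idx
--             elif tok_type != chunk_type or tok_class == "B":
--                 chunk = (chunk_type, chunk_start, idx)
--                 lchunk.append(chunk)
--                 chunk_type, chunk_start = tok_type, idx
--         else:
--             pass
--
--     # end
--     if chunk_type is not None:
--         chunk = (chunk_type, chunk_start, len(label))
--         lchunk.append(chunk)
--
--     return lchunk
-- ===== SOURCE B (Python) =====
-- def extract_chunk(label, entity_dict):
--     idx_other = entity_dict['O']
--     idx_dict = {idx: entity for entity, idx in entity_dict.items()}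
--
--     # decode every position first: None for 'O', else (class, type)
--     dec = [None if tok == idx_other
--            else (idx_dict[tok].split('-')[0], idx_dict[tok].split('-')[1])
--            for tok in label]
--     n = len(dec)
--
--     def starts(i):
--         d = dec[i]
--         if d is None:
--             return False
--         return i == 0 or dec[i - 1] is None or dec[i - 1][1] != d[1] or d[0] == 'B'
--
--     lchunk = []
--     for i in range(n):
--         if starts(i):
--             j = i + 1
--             while j < n and dec[j] is not None and not starts(j):
--                 j += 1
--             lchunk.append((dec[i][1], i, j))
--     return lchunk
-- ===== Notes on version B (the rewrite author's own statement) =====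
-- stated objective: alternative
-- what changed: B replaces A's running (chunk_type, chunk_start) state machine by a two-phase decomposition: first decode every label position to None or a (class, type) pair, then detect chunk boundaries purely by local neighbor comparisons on the decoded list (a chunk starts where the start test fires and ends at the next None/start or the end).
import Mathlib
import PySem

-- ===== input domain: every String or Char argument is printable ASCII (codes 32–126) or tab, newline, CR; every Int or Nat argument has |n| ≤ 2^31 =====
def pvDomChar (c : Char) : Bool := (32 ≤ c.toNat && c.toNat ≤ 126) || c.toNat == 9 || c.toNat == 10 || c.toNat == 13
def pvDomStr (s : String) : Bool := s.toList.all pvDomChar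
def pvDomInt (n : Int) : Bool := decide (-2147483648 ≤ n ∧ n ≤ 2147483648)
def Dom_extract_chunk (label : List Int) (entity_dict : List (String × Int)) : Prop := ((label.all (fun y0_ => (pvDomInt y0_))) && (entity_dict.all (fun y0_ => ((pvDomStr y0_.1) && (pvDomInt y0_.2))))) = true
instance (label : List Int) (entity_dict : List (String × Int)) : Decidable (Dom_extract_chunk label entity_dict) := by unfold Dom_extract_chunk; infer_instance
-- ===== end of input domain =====

-- B re-implements extract_chunk by first decoding every position to Option (class, type) and then
-- scanning with local neighbor comparisons (chunk starts/ends found by index tests) instead of A's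
-- running state machine; objective: alternative decomposition, same asymptotic cost.


-- shared helpers (first two lines of both Pythons are identical):
-- s.split('-')  (the separator "-" is nonempty, so split? is always `some` — exact)
def pvSplit (s : String) : List String := (PySem.Str.split? s "-").getD []

-- idx_dict = {idx: entity for entity, idx in entity_dict.items()}
def pvRev (entity_dict : List (String × Int)) : PySem.Dict Int String :=
  (PySem.Dict.ofList entity_dict).items.foldl (fun d p => d.insert p.2 p.1) PySem.Dict.empty

-- ===== PORT A =====
-- A's for-loop over enumerate(label) with state (chunk_type, chunk_start) : Option (String × Int)
def aloop (idx_dict : PySem.Dict Int String) (idx_other : Int) :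
    List Int → Int → Option (String × Int) → List (String × Int × Int) → List (String × Int × Int)
  | [], i, st, acc =>
    match st with
    | some (t, s) => acc ++ [(t, s, i)]
    | none => acc
  | tok :: rest, i, st, acc =>
    if tok == idx_other then
      match st with
      | some (t, s) => aloop idx_dict idx_other rest (i + 1) none (acc ++ [(t, s, i)])
      | none => aloop idx_dict idx_other rest (i + 1) none acc
    else
      let tok_class := (pvSplit (idx_dict.getD tok "")).getD 0 ""
      let tok_type := (pvSplit (idx_dict.getD tok "")).getD 1 ""
      match st with
      | none => aloop idx_dict idx_other rest (i + 1) (some (tok_type, i)) acc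
      | some (t, s) =>
        if tok_type != t || tok_class == "B" then
          aloop idx_dict idx_other rest (i + 1) (some (tok_type, i)) (acc ++ [(t, s, i)])
        else
          aloop idx_dict idx_other rest (i + 1) (some (t, s)) acc

def extract_chunk (label : List Int) (entity_dict : List (String × Int)) : List (String × Int × Int) :=
  let idx_other := (PySem.Dict.ofList entity_dict).getD "O" 0
  let idx_dict := pvRev entity_dict
  aloop idx_dict idx_other label 0 none []

-- ===== PORT B =====
-- a new chunk starts at i (Source B's `starts`)
def bStarts (dec : List (Option (String × String))) (i : Nat) : Bool :=
  match dec.getD i none with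
  | none => false
  | some (c, t) =>
    decide (i = 0) ||
      (match dec.getD (i - 1) none with
       | none => true
       | some (_, pt) => pt != t || c == "B")

-- Source B's `while j < n and dec[j] is not None and not starts(j): j += 1`
def bFindEnd (dec : List (Option (String × String))) (j : Nat) : Nat :=
  if h : j < dec.length ∧ (dec.getD j none).isSome ∧ bStarts dec j = false then
    bFindEnd dec (j + 1)
  else j
termination_by dec.length - j
decreasing_by omega

def extract_chunk_alt (label : List Int) (entity_dict : List (String × Int)) : List (String × Int × Int) :=
  let idx_other := (PySem.Dict.ofList entity_dict).getD "O" 0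
  let idx_dict := pvRev entity_dict
  let dec := label.map (fun tok =>
    if tok == idx_other then none
    else some ((pvSplit (idx_dict.getD tok "")).getD 0 "",
               (pvSplit (idx_dict.getD tok "")).getD 1 ""))
  (List.range dec.length).foldl (fun acc i =>
    if bStarts dec i then
      acc ++ [((match dec.getD i none with | some p => p.2 | none => ""),
               (i : Int), (bFindEnd dec (i + 1) : Int))]
    else acc) []

-- ===== PRECONDITION & SPEC =====
-- Pre_ excludes exactly the inputs on which the Python raises: a missing 'O' key (KeyError),
-- a label token other than entity_dict['O'] absent from the reversed dict (KeyError), or one whose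
-- entity name has no '-' so split('-')[1] raises IndexError.
def Pre_extract_chunk (label : List Int) (entity_dict : List (String × Int)) : Prop :=
  (PySem.Dict.ofList entity_dict).contains "O" = true ∧
  ∀ tok ∈ label, tok ≠ (PySem.Dict.ofList entity_dict).getD "O" 0 →
    (pvRev entity_dict).contains tok = true ∧
    2 ≤ (pvSplit ((pvRev entity_dict).getD tok "")).length
instance (label : List Int) (entity_dict : List (String × Int)) : Decidable (Pre_extract_chunk label entity_dict) := by
  unfold Pre_extract_chunk; infer_instance

def pvWitness_extract_chunk : List Int × (List (String × Int)) :=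
  ([1, 2, 0, 3, 3], [("O", 0), ("B-PER", 1), ("I-PER", 2), ("I-LOC", 3)])

def Spec_extract_chunk (label : List Int) (entity_dict : List (String × Int)) (out : List (String × Int × Int)) : Prop := out = extract_chunk_alt label entity_dict
instance (label : List Int) (entity_dict : List (String × Int)) (out : List (String × Int × Int)) : Decidable (Spec_extract_chunk label entity_dict out) := by unfold Spec_extract_chunk; infer_instance

-- ===== CLAIM (what is proved, stated in full; the proofs are below) =====
def Claim_equal_extract_chunk : Prop := ∀ (label : List Int) (entity_dict : List (String × Int)), Dom_extract_chunk label entity_dict → Pre_extract_chunk label entity_dict → Spec_extract_chunk label entity_dict (extract_chunk label entity_dict)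

-- ===== LEMMAS AND PROOFS =====

-- B's remaining emissions from position k on
def pvE (dec : List (Option (String × String))) (k : Nat) : List (String × Int × Int) :=
  ((List.range' k (dec.length - k)).filter (bStarts dec)).map (fun i =>
    ((match dec.getD i none with | some p => p.2 | none => ""),
     (i : Int), (bFindEnd dec (i + 1) : Int)))

theorem pvE_of_ge (dec : List (Option (String × String))) (k : Nat) (h : dec.length ≤ k) :
    pvE dec k = [] := by
  unfold pvE
  rw [Nat.sub_eq_zero_of_le h]
  rfl

theorem pvE_step_false (dec : List (Option (String × String))) (k : Nat)
    (h : k < dec.length) (hs : bStarts dec k = false) : pvE dec k = pvE dec (k + 1) := by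
  unfold pvE
  have : dec.length - k = (dec.length - (k + 1)) + 1 := by omega
  rw [this, List.range'_succ, List.filter_cons, hs]
  simp

theorem pvE_step_true (dec : List (Option (String × String))) (k : Nat)
    (h : k < dec.length) (hs : bStarts dec k = true) :
    pvE dec k = ((match dec.getD k none with | some p => p.2 | none => ""),
                 (k : Int), (bFindEnd dec (k + 1) : Int)) :: pvE dec (k + 1) := by
  unfold pvE
  have : dec.length - k = (dec.length - (k + 1)) + 1 := by omega
  rw [this, List.range'_succ, List.filter_cons, hs]
  rfl

theorem bFindEnd_stop (dec : List (Option (String × String))) (k : Nat)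
    (h : ¬(k < dec.length ∧ (dec.getD k none).isSome ∧ bStarts dec k = false)) :
    bFindEnd dec k = k := by
  rw [bFindEnd, dif_neg h]

theorem bFindEnd_step (dec : List (Option (String × String))) (k : Nat)
    (h1 : k < dec.length) (h2 : (dec.getD k none).isSome) (h3 : bStarts dec k = false) :
    bFindEnd dec k = bFindEnd dec (k + 1) := by
  rw [bFindEnd, dif_pos ⟨h1, h2, h3⟩]

-- the main invariant: A's loop over the suffix from k equals B's emissions from k,
-- with A's state related to the decoded value at position k-1
theorem aloop_eq_pvE (idx_dict : PySem.Dict Int String) (idx_other : Int) (label : List Int)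
    (dec : List (Option (String × String)))
    (hdec : dec = label.map (fun tok =>
      if tok == idx_other then none
      else some ((pvSplit (idx_dict.getD tok "")).getD 0 "",
                 (pvSplit (idx_dict.getD tok "")).getD 1 ""))) :
    ∀ (m k : Nat), m = label.length - k →
      ((∀ acc, (k = 0 ∨ dec.getD (k - 1) none = none) →
          aloop idx_dict idx_other (label.drop k) (k : Int) none acc = acc ++ pvE dec k) ∧
       (∀ acc (t : String) (s : Int) (c : String), 1 ≤ k → dec.getD (k - 1) none = some (c, t) →
          aloop idx_dict idx_other (label.drop k) (k : Int) (some (t, s)) acc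
            = acc ++ [(t, s, (bFindEnd dec k : Int))] ++ pvE dec k)) := by
  have hlen : dec.length = label.length := by rw [hdec, List.length_map]
  intro m
  induction m with
  | zero =>
    intro k hm
    have hge : label.length ≤ k := by omega
    have hdrop : label.drop k = [] := List.drop_eq_nil_of_le hge
    have hE : pvE dec k = [] := pvE_of_ge dec k (by omega)
    have hfe : bFindEnd dec k = k := bFindEnd_stop dec k (by omega)
    constructor
    · intro acc _
      rw [hdrop, hE]
      simp [aloop]
    · intro acc t s c _ _
      rw [hdrop, hE, hfe]
      simp [aloop]
  | succ m ih =>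
    intro k hm
    have hklab : k < label.length := by omega
    have hk : k < dec.length := by omega
    have IH := ih (k + 1) (by omega)
    have hdrop := List.drop_eq_getElem_cons hklab
    have hdk : dec.getD k none =
        (if (label[k]'hklab) == idx_other then none
         else some ((pvSplit (idx_dict.getD (label[k]'hklab) "")).getD 0 "",
                    (pvSplit (idx_dict.getD (label[k]'hklab) "")).getD 1 "")) := by
      subst hdec
      rw [List.getD_eq_getElem _ none hk]
      simp
    have hcast : ((k : Int) + 1) = ((k + 1 : Nat) : Int) := by push_cast; ring
    constructor
    · -- state = none
      intro acc hinv
      rw [hdrop]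
      by_cases htok : (label[k]'hklab == idx_other) = true
      · -- current token is 'O': nothing happens
        have hdkn : dec.getD k none = none := by rw [hdk, if_pos htok]
        have hs : bStarts dec k = false := by unfold bStarts; rw [hdkn]
        simp only [aloop, htok, if_pos]
        rw [hcast]
        rw [IH.1 acc (Or.inr (by simpa using hdkn))]
        rw [pvE_step_false dec k hk hs]
      · -- current token starts a chunk
        have hdks : dec.getD k none =
            some ((pvSplit (idx_dict.getD (label[k]'hklab) "")).getD 0 "",
                  (pvSplit (idx_dict.getD (label[k]'hklab) "")).getD 1 "") := by
          rw [hdk, if_neg htok]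
        have hs : bStarts dec k = true := by
          unfold bStarts
          rw [hdks]
          rcases hinv with h0 | hprev
          · simp [h0]
          · rw [hprev]
            simp
        simp only [aloop, htok, Bool.false_eq_true, if_false]
        rw [hcast]
        rw [IH.2 acc _ (k : Int) _ (by omega) (by simpa using hdks)]
        rw [pvE_step_true dec k hk hs, hdks]
        simp
    · -- state = some (t, s)
      intro acc t s c hk1 hprev
      rw [hdrop]
      by_cases htok : (label[k]'hklab == idx_other) = true
      · -- current token is 'O': chunk closes here
        have hdkn : dec.getD k none = none := by rw [hdk, if_pos htok]
        have hs : bStarts dec k = false := by unfold bStarts; rw [hdkn]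
        have hfe : bFindEnd dec k = k := bFindEnd_stop dec k (by rw [hdkn]; simp)
        simp only [aloop, htok, if_pos]
        rw [hcast]
        rw [IH.1 (acc ++ [(t, s, (k : Int))]) (Or.inr (by simpa using hdkn))]
        rw [pvE_step_false dec k hk hs, hfe]
      · -- current token is an entity
        have hdks : dec.getD k none =
            some ((pvSplit (idx_dict.getD (label[k]'hklab) "")).getD 0 "",
                  (pvSplit (idx_dict.getD (label[k]'hklab) "")).getD 1 "") := by
          rw [hdk, if_neg htok]
        set cls := (pvSplit (idx_dict.getD (label[k]'hklab) "")).getD 0 "" with hcls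
        set ty := (pvSplit (idx_dict.getD (label[k]'hklab) "")).getD 1 "" with hty
        have hk0 : ¬ (k = 0) := by omega
        simp only [aloop, htok, Bool.false_eq_true, if_false]
        by_cases hb : (ty != t || cls == "B") = true
        · -- close the chunk and open a new one
          have hs : bStarts dec k = true := by
            unfold bStarts
            rw [hdks, hprev]
            simp only [hk0, decide_false, Bool.false_or]
            rw [bne_comm]
            exact hb
          have hfe : bFindEnd dec k = k := bFindEnd_stop dec k (by rw [hs]; simp)
          rw [hcast, hb]
          simp only [if_true]
          rw [IH.2 (acc ++ [(t, s, (k : Int))]) ty (k : Int) cls (by omega) (by simpa using hdks)]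
          rw [pvE_step_true dec k hk hs, hdks, hfe]
          simp
        · -- continue the chunk
          have hb' : (ty != t || cls == "B") = false := by simpa using hb
          have htyt : ty = t := by simpa using (Bool.or_eq_false_iff.mp hb').1
          have hclsB : (cls == "B") = false := (Bool.or_eq_false_iff.mp hb').2
          have hs : bStarts dec k = false := by
            unfold bStarts
            rw [hdks, hprev, htyt]
            simp [hk0, hclsB]
          have hfe : bFindEnd dec k = bFindEnd dec (k + 1) :=
            bFindEnd_step dec k hk (by rw [hdks]; simp) hs
          rw [hcast, hb']
          simp only [Bool.false_eq_true, if_false]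
          rw [IH.2 acc t s cls (by omega) (by rw [← htyt]; simpa using hdks)]
          rw [pvE_step_false dec k hk hs, hfe]

-- ===== VERDICT (by name: the statement is the Claim_ definition above) =====
theorem extract_chunk_spec : Claim_equal_extract_chunk := by
  intro label entity_dict _ _
  unfold Spec_extract_chunk extract_chunk extract_chunk_alt
  rw [PySem.List.foldl_append_if]
  have h := (aloop_eq_pvE (pvRev entity_dict) ((PySem.Dict.ofList entity_dict).getD "O" 0) label _
      rfl label.length 0 (by simp)).1 [] (Or.inl rfl)
  rw [List.drop_zero] at h
  simp only [Nat.cast_zero] at h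
  rw [h]
  unfold pvE
  rw [List.range_eq_range', Nat.sub_zero]
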